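-- pv_equiv track=rewrite | github.com/SomashekaraS/Python | OrangeCap.py | orangecap
-- ===== SOURCE A (Python) =====
-- def orangecap(d):
--     matchscores = []
--     dictvalues = d.values()
--     matchscores = list(dictvalues)
--     allplayers = []
--     scores = dict()
--
--     for i in range(0,len(matchscores)):
--         temp = list(matchscores[i].keys())
--         for j in range(0,len(temp)):
--             allplayers.append(temp[j])
--
--     players = sorted(set(allplayers))
--
--     for player in players:
--         for i in range(0,len(matchscores)):
--             if player in matchscores[i]:
--                 if player in scores:
--                     scores[player] += matchscores[i][player]
--                 else:
--                     scores[player] = matchscores[i][player]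
--
--     (playername, totalscore) = ('player1', 0)
--     for player in scores:
--         if scores[player] > totalscore:
--             playername,totalscore = player, scores[player]
--
--     return (playername, totalscore)
-- ===== SOURCE B (Python) =====
-- def orangecap(d):
--     totals = {}
--     for m in d.values():
--         for p, s in m.items():
--             totals[p] = totals.get(p, 0) + s
--     best = ('player1', 0)
--     for p in sorted(totals):
--         s = totals[p]
--         if s > best[1]:
--             best = (p, s)
--     return best
-- ===== Notes on version B (the rewrite author's own statement) =====
-- stated objective: faster
-- what changed: B makes one pass over all match entries accumulating per-player totals in a dict (instead of A's scan of every match for every player), then scans the sorted players once for the strict-max.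
import Mathlib
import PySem

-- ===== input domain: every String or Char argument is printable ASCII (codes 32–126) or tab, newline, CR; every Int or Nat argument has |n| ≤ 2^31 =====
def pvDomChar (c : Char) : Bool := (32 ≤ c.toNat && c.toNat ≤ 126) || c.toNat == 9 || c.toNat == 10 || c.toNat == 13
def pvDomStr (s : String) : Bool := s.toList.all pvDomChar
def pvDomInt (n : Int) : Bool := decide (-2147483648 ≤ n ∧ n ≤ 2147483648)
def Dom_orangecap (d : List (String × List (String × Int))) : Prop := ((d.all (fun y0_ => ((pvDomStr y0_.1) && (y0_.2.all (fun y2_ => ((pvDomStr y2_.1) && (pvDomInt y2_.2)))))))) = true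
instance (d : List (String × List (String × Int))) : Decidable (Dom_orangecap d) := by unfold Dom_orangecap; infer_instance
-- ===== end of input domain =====

-- B replaces A's per-player scan of all matches by one accumulating pass over all match
-- entries, then a single scan of the sorted players (objective: faster).

-- ===== PORT A =====
def orangecap (d : List (String × List (String × Int))) : String × Int :=
  -- matchscores = list(d.values())  (the argument is a Python dict; each value is a dict)
  let matchscores : List (PySem.Dict String Int) :=
    ((PySem.Dict.ofList d).values).map (fun m => PySem.Dict.ofList m)
  -- for i …: temp = list(matchscores[i].keys()); for j …: allplayers.append(temp[j])
  let allplayers : List String :=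
    matchscores.foldl (fun acc m => m.keys.foldl (fun a t => a ++ [t]) acc) []
  -- players = sorted(set(allplayers))
  let players : List String :=
    PySem.List.sorted (PySem.Set.ofList allplayers) (fun x => x) false
  -- for player in players: for i …: if player in matchscores[i]: …
  let scores : PySem.Dict String Int :=
    players.foldl (fun sc p =>
      matchscores.foldl (fun sc m =>
        if m.contains p then
          if sc.contains p then sc.insert p (sc.getD p 0 + m.getD p 0)
          else sc.insert p (m.getD p 0)
        else sc) sc) PySem.Dict.empty
  -- for player in scores: if scores[player] > totalscore: …
  scores.keys.foldl (fun best p =>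
    if scores.getD p 0 > best.2 then (p, scores.getD p 0) else best) ("player1", 0)

-- ===== PORT B =====
def orangecap_alt (d : List (String × List (String × Int))) : String × Int :=
  -- for m in d.values(): for p, s in m.items(): totals[p] = totals.get(p, 0) + s
  let totals : PySem.Dict String Int :=
    (((PySem.Dict.ofList d).values).map (fun m => PySem.Dict.ofList m)).foldl
      (fun t m => m.items.foldl
        (fun t kv => t.insert kv.1 (t.getD kv.1 0 + kv.2)) t) PySem.Dict.empty
  -- for p in sorted(totals): if totals[p] > best[1]: best = (p, totals[p])
  (PySem.List.sorted totals.keys (fun x => x) false).foldl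
    (fun best p =>
      if totals.getD p 0 > best.2 then (p, totals.getD p 0) else best) ("player1", 0)

-- ===== PRECONDITION & SPEC =====
def Spec_orangecap (d : List (String × List (String × Int))) (out : String × Int) : Prop := out = orangecap_alt d
instance (d : List (String × List (String × Int))) (out : String × Int) : Decidable (Spec_orangecap d out) := by unfold Spec_orangecap; infer_instance

-- ===== CLAIM (what is proved, stated in full; the proofs are below) =====
def Claim_equal_orangecap : Prop := ∀ (d : List (String × List (String × Int))), Dom_orangecap d → Spec_orangecap d (orangecap d)

-- ===== LEMMAS AND PROOFS =====

-- total of player p over the list of match dicts (A's and B's common reference value)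
def pvTotal (ms : List (PySem.Dict String Int)) (p : String) : Int :=
  (ms.map (fun m => if m.contains p then m.getD p 0 else 0)).sum

-- A's inner-loop step for player p
def pvStepA (p : String) (sc : PySem.Dict String Int) (m : PySem.Dict String Int) :
    PySem.Dict String Int :=
  if m.contains p then
    if sc.contains p then sc.insert p (sc.getD p 0 + m.getD p 0)
    else sc.insert p (m.getD p 0)
  else sc

-- A's inner loop: lookups at q ≠ p unchanged, value at p accumulates, keys gain at most [p]
theorem pvInnerA (ms : List (PySem.Dict String Int)) (p : String)
    (sc : PySem.Dict String Int) :
    (∀ q, q ≠ p → (ms.foldl (pvStepA p) sc).get? q = sc.get? q) ∧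
    (ms.foldl (pvStepA p) sc).getD p 0 = sc.getD p 0 + pvTotal ms p ∧
    (ms.foldl (pvStepA p) sc).keys =
      sc.keys ++ (if sc.contains p = false ∧ ms.any (·.contains p) then [p] else []) := by
  induction ms generalizing sc with
  | nil => simp [pvTotal]
  | cons m ms ih =>
    by_cases hm : m.contains p = true
    · have hstep : pvStepA p sc m = sc.insert p (sc.getD p 0 + m.getD p 0) := by
        by_cases hsc : sc.contains p = true
        · simp [pvStepA, hm, hsc]
        · simp only [Bool.not_eq_true] at hsc
          simp [pvStepA, hm, hsc, PySem.Dict.getD_of_not_contains sc 0 hsc]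
      obtain ⟨ih1, ih2, ih3⟩ := ih (sc.insert p (sc.getD p 0 + m.getD p 0))
      refine ⟨?_, ?_, ?_⟩
      · intro q hq
        rw [List.foldl_cons, hstep, ih1 q hq, PySem.Dict.get?_insert_of_ne sc _ hq]
      · rw [List.foldl_cons, hstep, ih2, PySem.Dict.getD_insert_self]
        simp [pvTotal, hm]; ring
      · rw [List.foldl_cons, hstep, ih3]
        simp only [PySem.Dict.contains_insert_self, Bool.true_eq_false, false_and,
          if_false, List.append_nil]
        by_cases hsc : sc.contains p = true
        · rw [PySem.Dict.keys_insert_of_contains sc _ hsc]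
          simp [hsc]
        · simp only [Bool.not_eq_true] at hsc
          rw [PySem.Dict.keys_insert_of_not_contains sc _ hsc]
          simp [hsc, hm]
    · simp only [Bool.not_eq_true] at hm
      obtain ⟨ih1, ih2, ih3⟩ := ih sc
      refine ⟨?_, ?_, ?_⟩
      · intro q hq; simpa [pvStepA, hm] using ih1 q hq
      · simp [pvStepA, hm, ih2, pvTotal]
      · simp [pvStepA, hm, ih3]

-- A's outer loop preserves lookups at players not in the list
theorem pvOuterA_get? (ms : List (PySem.Dict String Int)) (ps : List String)
    (sc : PySem.Dict String Int) (q : String) (hq : q ∉ ps) :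
    (ps.foldl (fun sc p => ms.foldl (pvStepA p) sc) sc).get? q = sc.get? q := by
  induction ps generalizing sc with
  | nil => rfl
  | cons p ps ih =>
    simp only [List.mem_cons, not_or] at hq
    simp only [List.foldl_cons]
    rw [ih _ hq.2, (pvInnerA ms p sc).1 q hq.1]

-- A's outer loop over distinct, fresh, hit players: keys come out exactly in players order
theorem pvOuterA_keys (ms : List (PySem.Dict String Int)) (ps : List String)
    (sc : PySem.Dict String Int) (hnd : ps.Nodup)
    (hfresh : ∀ p ∈ ps, sc.contains p = false)
    (hhit : ∀ p ∈ ps, ms.any (·.contains p) = true) :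
    (ps.foldl (fun sc p => ms.foldl (pvStepA p) sc) sc).keys = sc.keys ++ ps := by
  induction ps generalizing sc with
  | nil => simp
  | cons p ps ih =>
    obtain ⟨hp, hnd⟩ := List.nodup_cons.mp hnd
    obtain ⟨h1, -, hk⟩ := pvInnerA ms p sc
    simp only [List.foldl_cons]
    rw [ih _ hnd]
    · rw [hk]
      simp [hfresh p (by simp), hhit p (by simp)]
    · intro q hq
      have hne : q ≠ p := fun h => hp (h ▸ hq)
      rw [PySem.Dict.contains_eq_isSome_get?, h1 q hne, ← PySem.Dict.contains_eq_isSome_get?]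
      exact hfresh q (by simp [hq])
    · intro q hq; exact hhit q (by simp [hq])

-- A's outer loop: final value at each processed player is its total over the matches
theorem pvOuterA_getD (ms : List (PySem.Dict String Int)) (ps : List String)
    (sc : PySem.Dict String Int) (hnd : ps.Nodup)
    (hfresh : ∀ p ∈ ps, sc.contains p = false) :
    ∀ p ∈ ps, (ps.foldl (fun sc p => ms.foldl (pvStepA p) sc) sc).getD p 0 = pvTotal ms p := by
  induction ps generalizing sc with
  | nil => simp
  | cons r ps ih =>
    obtain ⟨hr, hnd⟩ := List.nodup_cons.mp hnd
    intro p hp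
    simp only [List.foldl_cons]
    rcases List.mem_cons.mp hp with h | h
    · subst h
      rw [PySem.Dict.getD_eq_get?_getD, pvOuterA_get? ms ps _ p hr,
        ← PySem.Dict.getD_eq_get?_getD, (pvInnerA ms p sc).2.1,
        PySem.Dict.getD_of_not_contains sc 0 (hfresh p (by simp)), zero_add]
    · refine ih _ hnd ?_ p h
      intro q hq
      have hne : q ≠ r := fun hEq => hr (hEq ▸ hq)
      rw [PySem.Dict.contains_eq_isSome_get?, (pvInnerA ms r sc).1 q hne,
        ← PySem.Dict.contains_eq_isSome_get?]
      exact hfresh q (by simp [hq])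

-- B's per-match loop: the value accumulated at q is the sum of q's entries in the items list
theorem pvInnerB (l : List (String × Int)) (t : PySem.Dict String Int) (q : String) :
    (l.foldl (fun t kv => t.insert kv.1 (t.getD kv.1 0 + kv.2)) t).getD q 0 =
      t.getD q 0 + ((l.filter (fun kv => kv.1 == q)).map (·.2)).sum := by
  induction l generalizing t with
  | nil => simp
  | cons kv l ih =>
    simp only [List.foldl_cons, ih, List.filter_cons]
    by_cases h : kv.1 = q
    · subst h
      rw [PySem.Dict.getD_insert_self]
      simp; ring
    · rw [PySem.Dict.getD_insert_of_ne t _ _ (Ne.symm h)]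
      simp [h]

-- in a dict with distinct keys, that sum is the single lookup (or 0 when the key is absent)
theorem pvItemsSum (m : PySem.Dict String Int) (hnd : m.keys.Nodup) (q : String) :
    ((m.items.filter (fun kv => kv.1 == q)).map (·.2)).sum =
      if m.contains q then m.getD q 0 else 0 := by
  by_cases hc : m.contains q = true
  · obtain ⟨v, hv⟩ : ∃ v, m.get? q = some v := by
      have h := PySem.Dict.contains_eq_isSome_get? m q
      rw [hc] at h
      exact Option.isSome_iff_exists.mp h.symm
    have hmem : (q, v) ∈ m.items := PySem.Dict.mem_items_of_get?_eq_some m hv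
    have hgd : m.getD q 0 = v := PySem.Dict.getD_of_mem_items m hmem hnd 0
    obtain ⟨l1, l2, hsplit⟩ := List.append_of_mem hmem
    simp only [PySem.Dict.keys, hsplit, List.map_append, List.map_cons] at hnd
    have hq1 : q ∉ l1.map (·.1) := by
      intro h
      exact ((List.nodup_append.mp hnd).2.2 q h q (by simp)) rfl
    have hq2 : q ∉ l2.map (·.1) :=
      (List.nodup_cons.mp (List.nodup_append.mp hnd).2.1).1
    have f1 : l1.filter (fun kv => kv.1 == q) = [] :=
      List.filter_eq_nil_iff.mpr
        (fun kv hkv h => hq1 (List.mem_map.mpr ⟨kv, hkv, by simpa using h⟩))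
    have f2 : l2.filter (fun kv => kv.1 == q) = [] :=
      List.filter_eq_nil_iff.mpr
        (fun kv hkv h => hq2 (List.mem_map.mpr ⟨kv, hkv, by simpa using h⟩))
    rw [hsplit, List.filter_append, f1, List.filter_cons]
    simp [f2, hgd, hc]
  · simp only [Bool.not_eq_true] at hc
    rw [hc]
    have h0 : ∀ kv ∈ m.items, ¬ (kv.1 == q) = true := by
      intro kv hkv h
      have hqk : q ∈ m.keys := by
        simp only [PySem.Dict.keys]
        exact List.mem_map.mpr ⟨kv, hkv, by simpa using h⟩
      rw [← PySem.Dict.contains_iff_mem_keys] at hqk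
      simp [hc] at hqk
    rw [List.filter_eq_nil_iff.mpr h0]
    simp

-- B's accumulation over all matches (each with distinct keys) computes the totals
theorem pvTotalsB (ms : List (PySem.Dict String Int)) (t : PySem.Dict String Int)
    (hnd : ∀ m ∈ ms, m.keys.Nodup) (q : String) :
    (ms.foldl (fun t m => m.items.foldl
        (fun t kv => t.insert kv.1 (t.getD kv.1 0 + kv.2)) t) t).getD q 0 =
      t.getD q 0 + pvTotal ms q := by
  induction ms generalizing t with
  | nil => simp [pvTotal]
  | cons m ms ih =>
    simp only [List.foldl_cons]
    rw [ih _ (fun m' hm' => hnd m' (by simp [hm'])), pvInnerB,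
      pvItemsSum m (hnd m (by simp)) q]
    simp [pvTotal]; ring

-- B's totals dict has exactly the players of all matches, in first-appearance order
theorem pvTotalsB_keys (ms : List (PySem.Dict String Int)) (t : PySem.Dict String Int) :
    (ms.foldl (fun t m => m.items.foldl
        (fun t kv => t.insert kv.1 (t.getD kv.1 0 + kv.2)) t) t).keys =
      PySem.Set.update t.keys (ms.flatMap (fun m => m.keys)) := by
  induction ms generalizing t with
  | nil => simp
  | cons m ms ih =>
    simp only [List.foldl_cons, List.flatMap_cons]
    rw [ih, PySem.Dict.keys_foldl_insert_key, PySem.Set.update_append]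
    simp only [PySem.Dict.keys]

-- the whole equivalence, stated over the common list of match dicts
theorem pvCore (ms : List (PySem.Dict String Int)) (hnd : ∀ m ∈ ms, m.keys.Nodup) :
    ((PySem.List.sorted (PySem.Set.ofList
        (ms.foldl (fun acc m => m.keys.foldl (fun a t => a ++ [t]) acc) [])) (fun x => x) false).foldl
      (fun sc p => ms.foldl (fun sc m =>
        if m.contains p then
          if sc.contains p then sc.insert p (sc.getD p 0 + m.getD p 0)
          else sc.insert p (m.getD p 0)
        else sc) sc) PySem.Dict.empty).keys.foldl
      (fun best p =>
        if ((PySem.List.sorted (PySem.Set.ofList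
            (ms.foldl (fun acc m => m.keys.foldl (fun a t => a ++ [t]) acc) [])) (fun x => x) false).foldl
          (fun sc p => ms.foldl (fun sc m =>
            if m.contains p then
              if sc.contains p then sc.insert p (sc.getD p 0 + m.getD p 0)
              else sc.insert p (m.getD p 0)
            else sc) sc) PySem.Dict.empty).getD p 0 > best.2
        then (p, ((PySem.List.sorted (PySem.Set.ofList
            (ms.foldl (fun acc m => m.keys.foldl (fun a t => a ++ [t]) acc) [])) (fun x => x) false).foldl
          (fun sc p => ms.foldl (fun sc m =>
            if m.contains p then
              if sc.contains p then sc.insert p (sc.getD p 0 + m.getD p 0)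
              else sc.insert p (m.getD p 0)
            else sc) sc) PySem.Dict.empty).getD p 0)
        else best) ("player1", 0)
    =
    (PySem.List.sorted (ms.foldl (fun t m => m.items.foldl
        (fun t kv => t.insert kv.1 (t.getD kv.1 0 + kv.2)) t) PySem.Dict.empty).keys
      (fun x => x) false).foldl
      (fun best p =>
        if (ms.foldl (fun t m => m.items.foldl
            (fun t kv => t.insert kv.1 (t.getD kv.1 0 + kv.2)) t) PySem.Dict.empty).getD p 0 > best.2
        then (p, (ms.foldl (fun t m => m.items.foldl
            (fun t kv => t.insert kv.1 (t.getD kv.1 0 + kv.2)) t) PySem.Dict.empty).getD p 0)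
        else best) ("player1", 0) := by
  have hall : ms.foldl (fun acc m => m.keys.foldl (fun a t => a ++ [t]) acc) []
      = ms.flatMap (fun m => m.keys) := by
    rw [PySem.List.foldl_congr_mem ms _ (fun acc m => acc ++ m.keys) []
      (fun acc m _ => PySem.List.foldl_append_singleton _ _)]
    simpa using PySem.List.foldl_append_eq_flatMap (fun m => m.keys) ms []
  have hkB : (ms.foldl (fun t m => m.items.foldl
      (fun t kv => t.insert kv.1 (t.getD kv.1 0 + kv.2)) t) PySem.Dict.empty).keys
      = PySem.Set.ofList (ms.flatMap (fun m => m.keys)) := by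
    rw [pvTotalsB_keys, PySem.Dict.keys_empty, PySem.Set.update_nil_left]
  rw [hall, hkB]
  have hndp : (PySem.List.sorted (PySem.Set.ofList (ms.flatMap (fun m => m.keys)))
      (fun x => x) false).Nodup :=
    (PySem.List.sorted_perm _ _ _).nodup_iff.mpr (PySem.Set.nodup_ofList _)
  have hhit : ∀ p ∈ PySem.List.sorted (PySem.Set.ofList (ms.flatMap (fun m => m.keys)))
      (fun x => x) false, ms.any (·.contains p) = true := by
    intro p hp
    rw [PySem.List.mem_sorted, PySem.Set.mem_ofList, List.mem_flatMap] at hp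
    obtain ⟨m, hm, hpm⟩ := hp
    exact List.any_eq_true.mpr ⟨m, hm, (PySem.Dict.contains_iff_mem_keys m p).mpr hpm⟩
  have hkA : ((PySem.List.sorted (PySem.Set.ofList (ms.flatMap (fun m => m.keys)))
      (fun x => x) false).foldl
      (fun sc p => ms.foldl (pvStepA p) sc) PySem.Dict.empty).keys
      = PySem.List.sorted (PySem.Set.ofList (ms.flatMap (fun m => m.keys))) (fun x => x) false := by
    rw [pvOuterA_keys ms _ PySem.Dict.empty hndp
      (fun p _ => PySem.Dict.contains_empty p) hhit, PySem.Dict.keys_empty, List.nil_append]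
  rw [show (fun (sc : PySem.Dict String Int) (p : String) => ms.foldl (fun sc m =>
        if m.contains p then
          if sc.contains p then sc.insert p (sc.getD p 0 + m.getD p 0)
          else sc.insert p (m.getD p 0)
        else sc) sc) = (fun sc p => ms.foldl (pvStepA p) sc) from rfl]
  rw [hkA]
  apply PySem.List.foldl_congr_mem
  intro acc p hp
  rw [pvOuterA_getD ms _ PySem.Dict.empty hndp (fun p _ => PySem.Dict.contains_empty p) p hp,
    pvTotalsB ms PySem.Dict.empty hnd p, PySem.Dict.getD_empty, zero_add]

-- ===== VERDICT (by name: the statement is the Claim_ definition above) =====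
theorem orangecap_spec : Claim_equal_orangecap := by
  intro d _
  show orangecap d = orangecap_alt d
  have hnd : ∀ m ∈ ((PySem.Dict.ofList d).values).map (fun m => PySem.Dict.ofList m),
      m.keys.Nodup := by
    intro m hm
    obtain ⟨l, -, rfl⟩ := List.mem_map.mp hm
    exact PySem.Dict.nodup_keys_ofList l
  simpa only [orangecap, orangecap_alt] using
    pvCore (((PySem.Dict.ofList d).values).map (fun m => PySem.Dict.ofList m)) hnd
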